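-- pv_equiv track=rewrite | github.com/successPhil/leetcode-dsa | max-sum-after-partioning/main.py | maxSumAfterPartioning
-- ===== SOURCE A (Python) =====
-- def maxSumAfterPartioning(arr, k):
--     nums = len(arr)
--     dp = [0] * nums
--
--     for i in range(nums):
--         max_val = 0
--
--         for j in range(1,k+1, 1):
--             if i - j + 1 >= 0:
--                 max_val = max(max_val, arr[i-j + 1])
--                 dp[i] = max(dp[i], (dp[i-j] if i-j >= 0 else 0) + max_val * j)
--     return dp[-1]
-- ===== SOURCE B (Python) =====
-- def maxSumAfterPartioning(arr, k):
--     n = len(arr)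
--     memo = {}
--
--     def best(i):
--         # best partition sum for the prefix arr[:i]
--         if i == 0:
--             return 0
--         if i in memo:
--             return memo[i]
--         res = 0
--         m = 0
--         for j in range(1, min(k, i) + 1):
--             if arr[i - j] > m:
--                 m = arr[i - j]
--             cand = best(i - j) + m * j
--             if cand > res:
--                 res = cand
--         memo[i] = res
--         return res
--
--     return best(n)
-- ===== Notes on version B (the rewrite author's own statement) =====
-- stated objective: alternative
-- what changed: Replaces A's bottom-up dp-array sweep (outer loop filling dp[0..n-1] in order, inner loop guarded by i-j+1>=0) by a top-down memoized recursion best(i) on prefix lengths with the inner range capped at min(k,i) so no guard is needed; Pre_ excludes only the empty list, on which A raises IndexError via dp[-1] while B's recursion base returns 0.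
import Mathlib
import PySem

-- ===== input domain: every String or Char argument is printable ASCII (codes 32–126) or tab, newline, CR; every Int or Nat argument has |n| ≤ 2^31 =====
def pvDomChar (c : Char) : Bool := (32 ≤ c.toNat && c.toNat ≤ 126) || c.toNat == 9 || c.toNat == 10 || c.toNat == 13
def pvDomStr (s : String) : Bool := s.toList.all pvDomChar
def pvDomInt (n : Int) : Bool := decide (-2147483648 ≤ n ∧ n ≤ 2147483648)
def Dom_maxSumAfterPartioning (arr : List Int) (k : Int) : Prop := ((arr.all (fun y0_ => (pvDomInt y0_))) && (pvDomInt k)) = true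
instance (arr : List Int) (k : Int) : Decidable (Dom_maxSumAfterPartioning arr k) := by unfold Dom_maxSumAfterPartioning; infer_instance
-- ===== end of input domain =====

-- B replaces A's bottom-up dp-array sweep by a top-down memoized recursion on prefix
-- lengths (the Python memo is a pure cache and is not carried by the port); same value.

-- ===== PORT A =====
def maxSumAfterPartioning (arr : List Int) (k : Int) : Int :=
  let nums : Int := (arr.length : Int)
  let dp : List Int := List.replicate arr.length 0
  let dp :=
    (PySem.List.pyRange 0 nums 1).foldl (fun dp i =>
      ((PySem.List.pyRange 1 (k + 1) 1).foldl (fun (st : Int × List Int) j =>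
          if i - j + 1 ≥ 0 then
            let max_val := max st.1 (PySem.List.pyGetD arr (i - j + 1) 0)
            (max_val,
             PySem.List.pySetD st.2 i (max (PySem.List.pyGetD st.2 i 0)
               ((if i - j ≥ 0 then PySem.List.pyGetD st.2 (i - j) 0 else 0) + max_val * j)))
          else st) (0, dp)).2) dp
  PySem.List.pyGetD dp (-1) 0

-- ===== PORT B =====
-- Source B's recursive helper best(i): best partition sum for the prefix arr[:i].
-- The Python dict memo only caches values of this same recursion, so the port is the
-- bare recursion; state is (m, res) = (running window max, best candidate so far).
def pvBestB (arr : List Int) (k : Int) : Nat → Int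
  | 0 => 0
  | (i + 1) =>
    ((PySem.List.pyRange 1 (min k ((i + 1 : Nat) : Int) + 1) 1).attach.foldl
      (fun (st : Int × Int) j =>
        let m := if PySem.List.pyGetD arr (((i + 1 : Nat) : Int) - j.1) 0 > st.1
                 then PySem.List.pyGetD arr (((i + 1 : Nat) : Int) - j.1) 0 else st.1
        let cand := pvBestB arr k (((i + 1 : Nat) : Int) - j.1).toNat + m * j.1
        (m, if cand > st.2 then cand else st.2))
      (0, 0)).2
decreasing_by
  have h1 := (PySem.List.mem_pyRange_one.mp j.2).1
  omega

def maxSumAfterPartioning_alt (arr : List Int) (k : Int) : Int :=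
  pvBestB arr k arr.length

-- ===== PRECONDITION & SPEC =====
-- Pre_ excludes only the empty list, on which A raises IndexError via dp[-1].
def Pre_maxSumAfterPartioning (arr : List Int) (k : Int) : Prop := arr ≠ []
instance (arr : List Int) (k : Int) : Decidable (Pre_maxSumAfterPartioning arr k) := by
  unfold Pre_maxSumAfterPartioning; infer_instance
def pvWitness_maxSumAfterPartioning : List Int × Int := ([1, 15, 7, 9, 2, 5, 10], 3)

def Spec_maxSumAfterPartioning (arr : List Int) (k : Int) (out : Int) : Prop := out = maxSumAfterPartioning_alt arr k
instance (arr : List Int) (k : Int) (out : Int) : Decidable (Spec_maxSumAfterPartioning arr k out) := by unfold Spec_maxSumAfterPartioning; infer_instance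

-- ===== CLAIM (what is proved, stated in full; the proofs are below) =====
def Claim_equal_maxSumAfterPartioning : Prop := ∀ (arr : List Int) (k : Int), Dom_maxSumAfterPartioning arr k → Pre_maxSumAfterPartioning arr k → Spec_maxSumAfterPartioning arr k (maxSumAfterPartioning arr k)
-- ===== LEMMAS AND PROOFS =====

-- window maximum of arr[s..e-1], seeded with 0 exactly as both programs seed their running max
def pvW (arr : List Int) (s e : Nat) : Int :=
  (List.range' s (e - s)).foldl (fun a i => max a (arr.getD i 0)) 0

-- one inner-loop step of A's recurrence, reading prefix values from a table t (t[p] = value for prefix p)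
def pvGStep (arr : List Int) (t : List Int) (m : Nat) (st : Int × Int) (j : Int) : Int × Int :=
  if (m : Int) - j + 1 ≥ 0 then
    let mv := max st.1 (PySem.List.pyGetD arr ((m : Int) - j + 1) 0)
    (mv, max st.2 (PySem.List.pyGetD t ((m : Int) - j + 1) 0 + mv * j))
  else st

def pvNew (arr : List Int) (k : Int) (t : List Int) (m : Nat) : Int :=
  ((PySem.List.pyRange 1 (k + 1) 1).foldl (pvGStep arr t m) (0, 0)).2

-- the table of optimal (zero-floored) prefix values, T 0 .. T m
def pvTbl (arr : List Int) (k : Int) : Nat → List Int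
  | 0 => [0]
  | m + 1 => pvTbl arr k m ++ [pvNew arr k (pvTbl arr k m) m]

def pvT (arr : List Int) (k : Int) (m : Nat) : Int := (pvTbl arr k m).getD m 0

theorem pvTbl_length (arr : List Int) (k : Int) (m : Nat) : (pvTbl arr k m).length = m + 1 := by
  induction m with
  | zero => rfl
  | succ m ih => simp [pvTbl, ih]

theorem pvTbl_getD (arr : List Int) (k : Int) {p m : Nat} (h : p ≤ m) :
    (pvTbl arr k m).getD p 0 = pvT arr k p := by
  induction m with
  | zero => interval_cases p; rfl
  | succ m ih =>
    rcases Nat.lt_or_ge p (m + 1) with hp | hp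
    · rw [pvTbl, List.getD_append _ _ _ p (by rw [pvTbl_length]; omega)]
      exact ih (by omega)
    · have : p = m + 1 := by omega
      subst this; rfl

-- pull a max out of a guarded running-max fold
theorem pvFoldPull (p : Nat → Prop) [DecidablePred p] (g : Nat → Int) (l : List Nat) (a b : Int) :
    l.foldl (fun acc x => if p x then max acc (g x) else acc) (max a b)
      = max b (l.foldl (fun acc x => if p x then max acc (g x) else acc) a) := by
  induction l generalizing a with
  | nil => simp [max_comm]
  | cons x l ih =>
    by_cases hx : p x
    · simp only [List.foldl_cons, if_pos hx, max_right_comm a b (g x)]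
      exact ih (max a (g x))
    · simp only [List.foldl_cons, if_neg hx]
      exact ih a

theorem pvMaxPull (g : Nat → Int) (l : List Nat) (a b : Int) :
    l.foldl (fun acc x => max acc (g x)) (max a b)
      = max b (l.foldl (fun acc x => max acc (g x)) a) := by
  simpa using pvFoldPull (fun _ => True) g l a b

theorem pvW_left (arr : List Int) {s e : Nat} (h : s < e) :
    pvW arr s e = max (arr.getD s 0) (pvW arr (s + 1) e) := by
  unfold pvW
  have h1 : e - s = (e - s - 1) + 1 := by omega
  have h2 : e - (s + 1) = e - s - 1 := by omega
  rw [h1, List.range'_succ, List.foldl_cons, h2]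
  exact pvMaxPull (fun i => arr.getD i 0) _ 0 (arr.getD s 0)

-- candidate value of the block of length j ending at position m (1 ≤ j ≤ m+1)
def pvC (arr : List Int) (k : Int) (m j : Nat) : Int :=
  pvT arr k (m + 1 - j) + pvW arr (m + 1 - j) (m + 1) * (j : Int)

theorem pvGatherInv (arr : List Int) (k : Int) (m T : Nat) :
    (List.range T).foldl (fun st (t : Nat) => pvGStep arr (pvTbl arr k m) m st (1 + (t : Int))) ((0 : Int), (0 : Int))
      = (pvW arr (m + 1 - min T (m + 1)) (m + 1),
         (List.range (min T (m + 1))).foldl (fun acc t => max acc (pvC arr k m (t + 1))) 0) := by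
  induction T with
  | zero => simp [pvW]
  | succ T ih =>
    rw [List.range_succ, List.foldl_append, ih]
    simp only [List.foldl_cons, List.foldl_nil]
    by_cases hT : T ≤ m
    · have hmin : min T (m + 1) = T := by omega
      have hmin' : min (T + 1) (m + 1) = T + 1 := by omega
      have hg : (m : Int) - (1 + (T : Int)) + 1 ≥ 0 := by omega
      have hidx : (m : Int) - (1 + (T : Int)) + 1 = ((m - T : Nat) : Int) := by omega
      rw [pvGStep, if_pos hg, hidx]
      simp only [PySem.List.pyGetD_natCast]
      rw [pvTbl_getD arr k (by omega : m - T ≤ m)]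
      have hmv : max (pvW arr (m + 1 - min T (m + 1)) (m + 1)) (arr.getD (m - T) 0)
          = pvW arr (m + 1 - min (T + 1) (m + 1)) (m + 1) := by
        rw [hmin, hmin']
        have h1 : m + 1 - T = (m - T) + 1 := by omega
        have h2 : m + 1 - (T + 1) = m - T := by omega
        rw [h1, h2, pvW_left arr (by omega : m - T < m + 1), max_comm]
      rw [hmin, hmin', List.range_succ, List.foldl_append]
      simp only [List.foldl_cons, List.foldl_nil]
      rw [hmin, hmin'] at hmv
      simp only [Prod.mk.injEq]
      refine ⟨hmv, ?_⟩
      rw [hmv, pvC]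
      have h2 : m + 1 - (T + 1) = m - T := by omega
      rw [h2]
      push_cast
      ring_nf
    · have hmin : min T (m + 1) = m + 1 := by omega
      have hmin' : min (T + 1) (m + 1) = m + 1 := by omega
      rw [pvGStep, if_neg (by omega), hmin, hmin']

theorem pvGather (arr : List Int) (k : Int) (m : Nat) :
    pvNew arr k (pvTbl arr k m) m
      = (List.range (min k.toNat (m + 1))).foldl (fun acc t => max acc (pvC arr k m (t + 1))) 0 := by
  unfold pvNew
  rw [PySem.List.pyRange_one]
  have : (k + 1 - 1).toNat = k.toNat := by omega
  rw [this, List.foldl_map]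
  rw [pvGatherInv arr k m k.toNat]

theorem pvIfMax (a b : Int) : (if a > b then a else b) = max b a := by
  split_ifs with h
  · exact (max_eq_right h.le).symm
  · exact (max_eq_left (by omega)).symm

-- ===== B-side: the recursion computes the same prefix table =====
theorem pvBInner (arr : List Int) (k : Int) (m T : Nat) (hT : T ≤ m + 1)
    (IH : ∀ r, r ≤ m → pvBestB arr k r = pvT arr k r) :
    (List.range T).foldl
      (fun (st : Int × Int) (t : Nat) =>
        let j : Int := 1 + (t : Int)
        let mv := if PySem.List.pyGetD arr (((m + 1 : Nat) : Int) - j) 0 > st.1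
                  then PySem.List.pyGetD arr (((m + 1 : Nat) : Int) - j) 0 else st.1
        let cand := pvBestB arr k (((m + 1 : Nat) : Int) - j).toNat + mv * j
        (mv, if cand > st.2 then cand else st.2))
      (0, 0)
      = (pvW arr (m + 1 - T) (m + 1),
         (List.range T).foldl (fun acc t => max acc (pvC arr k m (t + 1))) 0) := by
  induction T with
  | zero =>
    simp [pvW]
  | succ T ihT =>
    have hT' : T ≤ m + 1 := by omega
    rw [List.range_succ, List.foldl_append, ihT hT', List.foldl_cons, List.foldl_nil]
    simp only
    have hidx : ((m + 1 : Nat) : Int) - (1 + (T : Int)) = ((m - T : Nat) : Int) := by omega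
    rw [hidx, PySem.List.pyGetD_natCast, Int.toNat_natCast]
    rw [IH (m - T) (by omega)]
    have hmv : (if arr.getD (m - T) 0 > pvW arr (m + 1 - T) (m + 1) then arr.getD (m - T) 0
                else pvW arr (m + 1 - T) (m + 1)) = pvW arr (m + 1 - (T + 1)) (m + 1) := by
      rw [pvIfMax]
      have h1 : m + 1 - T = (m - T) + 1 := by omega
      have h2 : m + 1 - (T + 1) = m - T := by omega
      rw [h1, h2, pvW_left arr (by omega : m - T < m + 1), max_comm]
    rw [hmv]
    simp only [Prod.mk.injEq]
    refine ⟨trivial, ?_⟩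
    rw [pvIfMax, List.foldl_append, List.foldl_cons, List.foldl_nil, pvC]
    have h2 : m + 1 - (T + 1) = m - T := by omega
    rw [h2]
    congr 1
    push_cast
    ring

theorem pvB_eq_T (arr : List Int) (k : Int) (r : Nat) : pvBestB arr k r = pvT arr k r := by
  induction r using Nat.strong_induction_on with
  | _ r IH =>
    cases r with
    | zero => simp [pvBestB, pvT, pvTbl]
    | succ m =>
      have hfold : pvBestB arr k (m + 1)
          = ((PySem.List.pyRange 1 (min k ((m + 1 : Nat) : Int) + 1) 1).foldl
              (fun (st : Int × Int) (j : Int) =>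
                let mv := if PySem.List.pyGetD arr (((m + 1 : Nat) : Int) - j) 0 > st.1
                          then PySem.List.pyGetD arr (((m + 1 : Nat) : Int) - j) 0 else st.1
                let cand := pvBestB arr k (((m + 1 : Nat) : Int) - j).toNat + mv * j
                (mv, if cand > st.2 then cand else st.2))
              (0, 0)).2 := by
        rw [pvBestB]
        rw [List.foldl_attach
          (f := fun (st : Int × Int) (j : Int) =>
            let mv := if PySem.List.pyGetD arr (((m + 1 : Nat) : Int) - j) 0 > st.1
                      then PySem.List.pyGetD arr (((m + 1 : Nat) : Int) - j) 0 else st.1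
            let cand := pvBestB arr k (((m + 1 : Nat) : Int) - j).toNat + mv * j
            (mv, if cand > st.2 then cand else st.2))]
      rw [hfold, PySem.List.pyRange_one]
      have hK : (min k ((m + 1 : Nat) : Int) + 1 - 1).toNat = min k.toNat (m + 1) := by omega
      rw [hK, List.foldl_map]
      rw [pvBInner arr k m (min k.toNat (m + 1)) (by omega)
        (fun r hr => IH r (by omega))]
      rw [← pvGather arr k m]
      show _ = pvT arr k (m + 1)
      unfold pvT
      rw [show pvTbl arr k (m + 1) = pvTbl arr k m ++ [pvNew arr k (pvTbl arr k m) m] from rfl,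
        List.getD_append_right _ _ _ _ (by rw [pvTbl_length]),
        pvTbl_length]
      simp

-- ===== A-side =====
def pvStepA (arr : List Int) (i : Int) (st : Int × List Int) (j : Int) : Int × List Int :=
  if i - j + 1 ≥ 0 then
    let max_val := max st.1 (PySem.List.pyGetD arr (i - j + 1) 0)
    (max_val,
     PySem.List.pySetD st.2 i (max (PySem.List.pyGetD st.2 i 0)
       ((if i - j ≥ 0 then PySem.List.pyGetD st.2 (i - j) 0 else 0) + max_val * j)))
  else st

-- A's dp array after the first i outer iterations
def pvDp (arr : List Int) (k : Int) (i : Nat) : List Int :=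
  (pvTbl arr k i).tail ++ List.replicate (arr.length - i) 0

theorem pvDp_length (arr : List Int) (k : Int) {i : Nat} (h : i ≤ arr.length) :
    (pvDp arr k i).length = arr.length := by
  have := pvTbl_length arr k i
  simp [pvDp, List.length_tail, this]
  omega

theorem pvDp_getD_lt (arr : List Int) (k : Int) {p i : Nat} (h : p < i) :
    (pvDp arr k i).getD p 0 = pvT arr k (p + 1) := by
  have hlen : (pvTbl arr k i).tail.length = i := by
    simp [List.length_tail, pvTbl_length]
  unfold pvDp
  rw [List.getD_append _ _ _ p (by omega)]
  rw [List.getD_eq_getElem?_getD, List.getElem?_tail, ← List.getD_eq_getElem?_getD]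
  exact pvTbl_getD arr k (by omega)

theorem pvDp_getD_ge (arr : List Int) (k : Int) {p i : Nat} (h : i ≤ p) :
    (pvDp arr k i).getD p 0 = 0 := by
  have hlen : (pvTbl arr k i).tail.length = i := by
    simp [List.length_tail, pvTbl_length]
  unfold pvDp
  rw [List.getD_eq_getElem?_getD, List.getElem?_append_right (by omega)]
  rcases Nat.lt_or_ge (p - (pvTbl arr k i).tail.length) (arr.length - i) with hp | hp
  · rw [List.getElem?_eq_getElem (by simpa using hp)]
    simp
  · rw [List.getElem?_eq_none (by simpa using hp)]
    rfl

theorem pvA_inner (arr : List Int) (k : Int) (i : Nat) (hi : i < arr.length)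
    (js : List Int) (hjs : ∀ j ∈ js, 1 ≤ j) (mv acc : Int) :
    js.foldl (pvStepA arr (i : Int)) (mv, (pvDp arr k i).set i acc)
      = ((js.foldl (pvGStep arr (pvTbl arr k i) i) (mv, acc)).1,
         (pvDp arr k i).set i (js.foldl (pvGStep arr (pvTbl arr k i) i) (mv, acc)).2) := by
  induction js generalizing mv acc with
  | nil => rfl
  | cons j js ihj =>
    have hj : 1 ≤ j := hjs j List.mem_cons_self
    have hjs' : ∀ j' ∈ js, 1 ≤ j' := fun j' hj' => hjs j' (List.mem_cons_of_mem _ hj')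
    rw [List.foldl_cons, List.foldl_cons]
    by_cases hg : (i : Int) - j + 1 ≥ 0
    · rw [pvStepA, if_pos hg, pvGStep, if_pos hg]
      simp only
      have hilen : i < ((pvDp arr k i).set i acc).length := by
        rw [List.length_set, pvDp_length arr k (by omega)]; exact hi
      have hgetI : PySem.List.pyGetD ((pvDp arr k i).set i acc) ((i : Nat) : Int) 0 = acc := by
        rw [PySem.List.pyGetD_natCast, List.getD_eq_getElem _ _ hilen, List.getElem_set,
          if_pos rfl]
      have hX : (if (i : Int) - j ≥ 0 then PySem.List.pyGetD ((pvDp arr k i).set i acc) ((i : Int) - j) 0 else 0)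
          = PySem.List.pyGetD (pvTbl arr k i) ((i : Int) - j + 1) 0 := by
        by_cases h2 : (i : Int) - j ≥ 0
        · have hq : ∃ q : Nat, ((q : Int) = (i : Int) - j ∧ q < i) := ⟨((i : Int) - j).toNat, by omega, by omega⟩
          obtain ⟨q, hq1, hq2⟩ := hq
          rw [if_pos h2, ← hq1, show (q : Int) + 1 = ((q + 1 : Nat) : Int) by omega]
          rw [PySem.List.pyGetD_natCast, PySem.List.pyGetD_natCast]
          rw [List.getD_eq_getElem?_getD, List.getElem?_set_ne (by omega), ← List.getD_eq_getElem?_getD]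
          rw [pvDp_getD_lt arr k hq2, pvTbl_getD arr k (by omega)]
        · have h3 : (i : Int) - j + 1 = ((0 : Nat) : Int) := by omega
          rw [if_neg h2, h3, PySem.List.pyGetD_natCast, pvTbl_getD arr k (by omega)]
          rfl
      rw [hgetI, hX, PySem.List.pySetD_natCast, List.set_set]
      exact ihj hjs' _ _
    · rw [pvStepA, if_neg hg, pvGStep, if_neg hg]
      exact ihj hjs' mv acc

theorem pvDp_set_self (arr : List Int) (k : Int) {i : Nat} (hi : i < arr.length) :
    (pvDp arr k i).set i 0 = pvDp arr k i := by
  have h0 : (pvDp arr k i).getD i 0 = 0 := pvDp_getD_ge arr k le_rfl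
  have hlen : i < (pvDp arr k i).length := by rw [pvDp_length arr k (by omega)]; exact hi
  rw [List.getD_eq_getElem _ _ hlen] at h0
  rw [← h0, List.set_getElem_self]

theorem pvDp_step (arr : List Int) (k : Int) {i : Nat} (hi : i < arr.length) :
    (pvDp arr k i).set i (pvNew arr k (pvTbl arr k i) i) = pvDp arr k (i + 1) := by
  have hlen : (pvTbl arr k i).tail.length = i := by
    simp [List.length_tail, pvTbl_length]
  have hrep : List.replicate (arr.length - i) (0 : Int) = 0 :: List.replicate (arr.length - (i + 1)) 0 := by
    rw [show arr.length - i = (arr.length - (i + 1)) + 1 by omega, List.replicate_succ]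
  unfold pvDp
  rw [List.set_append, if_neg (by omega), hlen, Nat.sub_self, hrep]
  have htail : (pvTbl arr k i ++ [pvNew arr k (pvTbl arr k i) i]).tail
      = (pvTbl arr k i).tail ++ [pvNew arr k (pvTbl arr k i) i] := by
    have : pvTbl arr k i ≠ [] := by
      intro hco
      have := pvTbl_length arr k i
      rw [hco] at this
      simp at this
    cases hcons : pvTbl arr k i with
    | nil => exact absurd hcons this
    | cons a l => simp
  rw [show pvTbl arr k (i + 1) = pvTbl arr k i ++ [pvNew arr k (pvTbl arr k i) i] from rfl, htail]
  simp

theorem pvA_outer (arr : List Int) (k : Int) (M : Nat) (hM : M ≤ arr.length) :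
    (List.range M).foldl (fun (dp : List Int) (i : Nat) =>
        ((PySem.List.pyRange 1 (k + 1) 1).foldl (pvStepA arr ((i : Nat) : Int)) (0, dp)).2)
      (List.replicate arr.length 0)
      = pvDp arr k M := by
  induction M with
  | zero =>
    rw [List.range_zero, List.foldl_nil]
    simp [pvDp, pvTbl]
  | succ M ih =>
    rw [List.range_succ, List.foldl_append, ih (by omega), List.foldl_cons, List.foldl_nil]
    have hM' : M < arr.length := by omega
    rw [show ((0 : Int), pvDp arr k M) = ((0 : Int), (pvDp arr k M).set M 0) from by
      rw [pvDp_set_self arr k hM']]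
    rw [pvA_inner arr k M hM' _ (fun j hj => ((PySem.List.mem_pyRange_one).mp hj).1) 0 0]
    simp only
    rw [show ((PySem.List.pyRange 1 (k + 1) 1).foldl (pvGStep arr (pvTbl arr k M) M) (0, 0)).2
        = pvNew arr k (pvTbl arr k M) M from rfl]
    exact pvDp_step arr k hM'

theorem pvA_eq (arr : List Int) (k : Int) (h : arr ≠ []) :
    maxSumAfterPartioning arr k = pvT arr k arr.length := by
  show PySem.List.pyGetD
      ((PySem.List.pyRange 0 ((arr.length : Nat) : Int) 1).foldl
        (fun (dp : List Int) (i : Int) =>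
          ((PySem.List.pyRange 1 (k + 1) 1).foldl (pvStepA arr i) (0, dp)).2)
        (List.replicate arr.length 0)) (-1) 0
    = pvT arr k arr.length
  rw [PySem.List.pyRange_zero_nat, List.foldl_map]
  rw [show (fun (x : List Int) (y : Nat) =>
      ((PySem.List.pyRange 1 (k + 1) 1).foldl (pvStepA arr ((y : Nat) : Int)) (0, x)).2)
    = (fun (dp : List Int) (i : Nat) =>
      ((PySem.List.pyRange 1 (k + 1) 1).foldl (pvStepA arr ((i : Nat) : Int)) (0, dp)).2) from rfl]
  rw [pvA_outer arr k arr.length le_rfl]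
  have hn : 1 ≤ arr.length := by
    cases arr with
    | nil => exact absurd rfl h
    | cons a l => simp
  have hdp : pvDp arr k arr.length = (pvTbl arr k arr.length).tail := by
    unfold pvDp
    simp
  rw [hdp]
  have htne : (pvTbl arr k arr.length).tail ≠ [] := by
    have : (pvTbl arr k arr.length).tail.length = arr.length := by
      simp [List.length_tail, pvTbl_length]
    intro hco
    rw [hco] at this
    simp at this
    omega
  rw [PySem.List.pyGetD_neg_one _ _ htne]
  have hlt : (pvTbl arr k arr.length).tail.length - 1 < (pvTbl arr k arr.length).tail.length := by
    have : (pvTbl arr k arr.length).tail.length = arr.length := by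
      simp [List.length_tail, pvTbl_length]
    omega
  rw [List.getLast_eq_getElem]
  have hlen : (pvTbl arr k arr.length).tail.length = arr.length := by
    simp [List.length_tail, pvTbl_length]
  have : (pvTbl arr k arr.length).tail[(pvTbl arr k arr.length).tail.length - 1]'hlt
      = (pvDp arr k arr.length).getD ((pvTbl arr k arr.length).tail.length - 1) 0 := by
    rw [hdp, List.getD_eq_getElem _ _ hlt]
  rw [this, hlen]
  have := pvDp_getD_lt arr k (p := arr.length - 1) (i := arr.length) (by omega)
  rw [this, show arr.length - 1 + 1 = arr.length by omega]

-- ===== VERDICT (by name: the statement is the Claim_ definition above) =====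
theorem maxSumAfterPartioning_spec : Claim_equal_maxSumAfterPartioning := by
  intro arr k _ hpre
  unfold Spec_maxSumAfterPartioning
  rw [pvA_eq arr k hpre]
  show pvT arr k arr.length = pvBestB arr k arr.length
  rw [pvB_eq_T]
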